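-- pv_equiv track=rewrite | github.com/juggao/fracgen | fracgen.py | generate_fractions_o_o
-- ===== SOURCE A (Python) =====
-- def generate_fractions_o_o(startnumerator, endnumerator, startdenominator, enddenominator):
--     fractions = []
--     for i in range(startnumerator, endnumerator):
--         # Check if i is even
--         if i % 2 != 0:
--             for j in range(startdenominator,enddenominator):
--                 if j % 2 != 0:
--                     fractions.append((i, j))
--     return fractions
-- ===== SOURCE B (Python) =====
-- def generate_fractions_o_o(startnumerator, endnumerator, startdenominator, enddenominator):
--     # No parity test per element: each axis is generated directly as a step-2 range
--     # starting at the first odd value at or above its start.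
--     def first_odd(s):
--         return s if s % 2 else s + 1
--     nums = range(first_odd(startnumerator), endnumerator, 2)
--     dens = range(first_odd(startdenominator), enddenominator, 2)
--     return [(i, j) for i in nums for j in dens]
-- ===== Notes on version B (the rewrite author's own statement) =====
-- stated objective: simpler
-- what changed: Replaces the nested scans with per-element parity tests by two step-2 ranges starting at the first odd value of each axis, combined with a product comprehension; no modulo branch is evaluated per element.
import Mathlib
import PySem

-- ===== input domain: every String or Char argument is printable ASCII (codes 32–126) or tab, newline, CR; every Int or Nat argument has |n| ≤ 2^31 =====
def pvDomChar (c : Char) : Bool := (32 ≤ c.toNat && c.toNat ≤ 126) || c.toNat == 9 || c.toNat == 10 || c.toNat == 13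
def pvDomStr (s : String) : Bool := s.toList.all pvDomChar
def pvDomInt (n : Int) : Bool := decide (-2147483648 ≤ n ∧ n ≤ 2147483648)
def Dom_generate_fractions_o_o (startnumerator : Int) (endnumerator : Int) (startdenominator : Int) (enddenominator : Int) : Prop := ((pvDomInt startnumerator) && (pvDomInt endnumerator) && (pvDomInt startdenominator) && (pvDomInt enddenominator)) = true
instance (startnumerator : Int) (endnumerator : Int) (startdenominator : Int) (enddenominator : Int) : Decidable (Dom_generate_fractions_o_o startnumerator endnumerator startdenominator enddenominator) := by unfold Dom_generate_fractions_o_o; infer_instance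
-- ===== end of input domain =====

-- B replaces A's nested scans with per-element parity tests by two step-2 odd ranges combined as a product (simpler decomposition; return value only).


-- ===== PORT A =====
def generate_fractions_o_o (startnumerator : Int) (endnumerator : Int) (startdenominator : Int) (enddenominator : Int) : List (Int × Int) :=
  (PySem.List.pyRange startnumerator endnumerator 1).foldl (fun fractions i =>
    if PySem.Int.mod i 2 != 0 then
      (PySem.List.pyRange startdenominator enddenominator 1).foldl (fun fractions j =>
        if PySem.Int.mod j 2 != 0 then fractions ++ [(i, j)] else fractions) fractions
    else fractions) []

-- ===== PORT B =====
-- first odd value at or above s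
def pvFirstOdd (s : Int) : Int := if PySem.Int.mod s 2 != 0 then s else s + 1

def generate_fractions_o_o_alt (startnumerator : Int) (endnumerator : Int) (startdenominator : Int) (enddenominator : Int) : List (Int × Int) :=
  let nums := PySem.List.pyRange (pvFirstOdd startnumerator) endnumerator 2
  -- dens is a lazy range in Source B: it is produced inside the per-numerator step
  nums.flatMap (fun i =>
    (PySem.List.pyRange (pvFirstOdd startdenominator) enddenominator 2).map (fun j => (i, j)))

-- ===== PRECONDITION & SPEC =====
def Spec_generate_fractions_o_o (startnumerator : Int) (endnumerator : Int) (startdenominator : Int) (enddenominator : Int) (out : List (Int × Int)) : Prop := out = generate_fractions_o_o_alt startnumerator endnumerator startdenominator enddenominator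
instance (startnumerator : Int) (endnumerator : Int) (startdenominator : Int) (enddenominator : Int) (out : List (Int × Int)) : Decidable (Spec_generate_fractions_o_o startnumerator endnumerator startdenominator enddenominator out) := by unfold Spec_generate_fractions_o_o; infer_instance

-- ===== CLAIM (what is proved, stated in full; the proofs are below) =====
def Claim_equal_generate_fractions_o_o : Prop := ∀ (startnumerator : Int) (endnumerator : Int) (startdenominator : Int) (enddenominator : Int), Dom_generate_fractions_o_o startnumerator endnumerator startdenominator enddenominator → Spec_generate_fractions_o_o startnumerator endnumerator startdenominator enddenominator (generate_fractions_o_o startnumerator endnumerator startdenominator enddenominator)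

-- ===== LEMMAS AND PROOFS =====
-- flatMap over a filtered list = flatMap with an if
lemma pv_flatMap_filter {α β : Type} (p : α → Bool) (g : α → List β) (l : List α) :
    (l.filter p).flatMap g = l.flatMap (fun x => if p x then g x else []) := by
  induction l with
  | nil => rfl
  | cons x xs ih =>
      by_cases h : p x = true <;>
        simp [List.flatMap_cons, h, ih]

-- core: for an odd a' characterising the odd points at or above a, the odd
-- elements of range(a,b) are exactly range(a',b,2)
lemma pv_filter_odd_core (a b a' : Int)
    (hchar : ∀ x : Int, (a ≤ x ∧ x % 2 = 1) ↔ (a' ≤ x ∧ 2 ∣ x - a')) :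
    (PySem.List.pyRange a b 1).filter (fun i => PySem.Int.mod i 2 != 0)
      = PySem.List.pyRange a' b 2 := by
  have h2 : (0 : Int) < 2 := by norm_num
  have hnd₁ : ((PySem.List.pyRange a b 1).filter
      (fun i => PySem.Int.mod i 2 != 0)).Nodup :=
    (PySem.List.nodup_pyRange_one a b).filter _
  have hnd₂ : (PySem.List.pyRange a' b 2).Nodup := by
    rw [PySem.List.pyRange_of_pos _ _ h2]
    refine List.Nodup.map ?_ List.nodup_range
    intro x y hxy
    dsimp only at hxy
    omega
  have hmem : ∀ x : Int,
      x ∈ (PySem.List.pyRange a b 1).filter (fun i => PySem.Int.mod i 2 != 0)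
        ↔ x ∈ PySem.List.pyRange a' b 2 := by
    intro x
    rw [List.mem_filter, PySem.List.mem_pyRange_one,
      PySem.List.mem_pyRange_iff_of_pos h2]
    have hm : PySem.Int.mod x 2 = x % 2 :=
      PySem.Int.mod_eq_emod_of_pos h2
    have hx := hchar x
    simp only [hm, bne_iff_ne, ne_eq]
    omega
  refine List.eq_of_perm_of_sorted (le := (· < ·)) (fun x y _ _ h1 h1' => by omega)
    (List.Pairwise.filter _ (PySem.List.pairwise_lt_pyRange_one a b)) ?_ ?_
  · rw [PySem.List.pyRange_of_pos _ _ h2]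
    refine List.Pairwise.map _ ?_ List.pairwise_lt_range
    intro x y hxy
    have : (x : Int) < y := by exact_mod_cast hxy
    omega
  · exact (List.perm_ext_iff_of_nodup hnd₁ hnd₂).2 hmem

-- the odd elements of range(a,b) are exactly range(firstOdd a, b, 2)
lemma pv_filter_odd_pyRange (a b : Int) :
    (PySem.List.pyRange a b 1).filter (fun i => PySem.Int.mod i 2 != 0)
      = PySem.List.pyRange (pvFirstOdd a) b 2 := by
  have h2 : (0 : Int) < 2 := by norm_num
  have hma : PySem.Int.mod a 2 = a % 2 := PySem.Int.mod_eq_emod_of_pos h2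
  by_cases h : a % 2 = 0
  · have hfo : pvFirstOdd a = a + 1 := by simp [pvFirstOdd, h]
    rw [hfo]
    exact pv_filter_odd_core a b (a + 1) (fun x => by omega)
  · have hfo : pvFirstOdd a = a := by
      have : a % 2 = 1 := by omega
      simp [pvFirstOdd, this]
    rw [hfo]
    have h1 : a % 2 = 1 := by omega
    exact pv_filter_odd_core a b a (fun x => by omega)

-- ===== VERDICT (by name: the statement is the Claim_ definition above) =====
theorem generate_fractions_o_o_spec : Claim_equal_generate_fractions_o_o := by
  intro sn en sd ed _
  unfold Spec_generate_fractions_o_o generate_fractions_o_o generate_fractions_o_o_alt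
  have hin : ∀ (i : Int) (acc : List (Int × Int)),
      (PySem.List.pyRange sd ed 1).foldl (fun fractions j =>
        if PySem.Int.mod j 2 != 0 then fractions ++ [(i, j)] else fractions) acc
      = acc ++ ((PySem.List.pyRange sd ed 1).filter
          (fun j => PySem.Int.mod j 2 != 0)).map (fun j => (i, j)) := by
    intro i acc
    exact PySem.List.foldl_append_if (fun j => PySem.Int.mod j 2 != 0) (fun j => (i, j)) _ acc
  calc (PySem.List.pyRange sn en 1).foldl (fun fractions i =>
        if PySem.Int.mod i 2 != 0 then
          (PySem.List.pyRange sd ed 1).foldl (fun fractions j =>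
            if PySem.Int.mod j 2 != 0 then fractions ++ [(i, j)] else fractions) fractions
        else fractions) []
      = (PySem.List.pyRange sn en 1).foldl (fun fractions i =>
          fractions ++ (if PySem.Int.mod i 2 != 0 then
            ((PySem.List.pyRange sd ed 1).filter
              (fun j => PySem.Int.mod j 2 != 0)).map (fun j => (i, j)) else [])) [] := by
        apply PySem.List.foldl_congr_mem
        intro acc i _
        by_cases h : (PySem.Int.mod i 2 != 0) = true
        · rw [if_pos h, if_pos h, hin]
        · rw [if_neg h, if_neg h, List.append_nil]
    _ = ((PySem.List.pyRange sn en 1).filter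
          (fun i => PySem.Int.mod i 2 != 0)).flatMap (fun i =>
            ((PySem.List.pyRange sd ed 1).filter
              (fun j => PySem.Int.mod j 2 != 0)).map (fun j => (i, j))) := by
        rw [PySem.List.foldl_append_eq_flatMap, List.nil_append, pv_flatMap_filter]
    _ = _ := by rw [pv_filter_odd_pyRange, pv_filter_odd_pyRange]
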